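/- GENERATED by mk_final_copies.py from the proof of the farm's unit `decode_residue.1a` (farm:decode_residue.1a.1: Proof.lean) as the
   re-elaboration sweep compiled it — do not edit. -/
import Vorbis.Spec.Units.decode_residue_1a
import Vorbis.Spec.Worked.decode_residue_1a_Lemmas

open X86 X86.User Asan Vorbis Vorbis.Spec Vorbis.Spec.DecodeResidue

/-- Unit `decode_residue.1a`: the protected prologue of `decode_residue` (0x10ec00–0x10ec90: six pushes, `sub rsp, 0xc8`, the spills,
the frame header, the three shadow stores, the check of `f->residue_config`) takes the function's entry to the assertion `At1b` at
0x10ec95. The walk and the shadow step (`ShadowInv.prologue_ra`) are `prologue_walk` of Lemmas.lean. -/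
theorem Vorbis.Spec.Worked.decode_residue_1a_ok : Vorbis.Spec.decode_residue_1a.Statement := by
  intro Lay hLay μ hμ u₀ hcode hld8
  intro g hent
  exact Vorbis.Spec.decode_residue_1a.prologue_walk hLay hμ hcode hld8 g hent
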